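-- pv_equiv track=rewrite | github.com/Charles822/eau | eau06.py | convert_into_upper
-- ===== SOURCE A (Python) =====
-- def convert_into_upper(normal_string, letters):
-- 	converted_string = ""
-- 	converter_count = 0 # we set a converter count to build the logic where we convert in uppercase every 2 letters
-- 	# we convert only if the converter count is an even number and belong to a - z
-- 	for char in normal_string:
-- 		if char in letters and converter_count % 2 == 0:
-- 			converted_string += char.upper()
-- 			converter_count += 1
-- 		elif char in letters and converter_count % 2 != 0:
-- 			converted_string += char
-- 			converter_count += 1
-- 		else:
-- 			converted_string += char
-- 	return converted_string
-- ===== SOURCE B (Python) =====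
-- def convert_into_upper(normal_string, letters):
--     result = list(normal_string)
--     matches = [i for i, ch in enumerate(normal_string) if ch in letters]
--     for rank, i in enumerate(matches):
--         if rank % 2 == 0:
--             result[i] = result[i].upper()
--     return ''.join(result)
-- ===== Notes on version B (the rewrite author's own statement) =====
-- stated objective: alternative
-- what changed: Replaces the single pass with a running parity counter by two passes: first build an index table of positions whose character occurs in letters, then uppercase the even-ranked positions in a mutable list.
import Mathlib
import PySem

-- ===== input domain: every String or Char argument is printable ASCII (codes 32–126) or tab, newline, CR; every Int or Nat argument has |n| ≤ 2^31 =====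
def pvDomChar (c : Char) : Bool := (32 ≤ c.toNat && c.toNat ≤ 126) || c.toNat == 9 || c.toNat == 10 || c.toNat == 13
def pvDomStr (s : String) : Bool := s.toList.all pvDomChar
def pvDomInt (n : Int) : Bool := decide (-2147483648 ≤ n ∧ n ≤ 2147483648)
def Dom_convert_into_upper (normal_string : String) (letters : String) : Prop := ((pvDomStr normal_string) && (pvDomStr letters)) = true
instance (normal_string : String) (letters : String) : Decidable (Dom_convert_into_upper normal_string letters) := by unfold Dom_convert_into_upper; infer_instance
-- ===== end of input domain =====

-- B replaces A's single pass with a running parity counter by two passes: an index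
-- table of matching positions, then uppercasing the even-ranked ones in place (alternative decomposition).

-- ===== PORT A =====
-- literal transliteration of A: one fold over the characters carrying (converted_string, converter_count)
def convert_into_upper (normal_string : String) (letters : String) : String :=
  String.mk
    (normal_string.toList.foldl
      (fun (st : List Char × Int) c =>
        if PySem.Chars.isIn [c] letters.toList && (st.2 % 2 == 0) then
          (st.1 ++ [PySem.Chars.upperChar c], st.2 + 1)
        else if PySem.Chars.isIn [c] letters.toList && !(st.2 % 2 == 0) then
          (st.1 ++ [c], st.2 + 1)
        else
          (st.1 ++ [c], st.2))
      ([], 0)).1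

-- ===== PORT B =====
-- literal transliteration of B: result = list(s); matches = [i for i,ch in enumerate(s) if ch in letters];
-- for rank,i in enumerate(matches): if rank % 2 == 0: result[i] = result[i].upper(); return ''.join(result)
def convert_into_upper_alt (normal_string : String) (letters : String) : String :=
  String.mk
    ((PySem.List.enumerate
        (((PySem.List.enumerate normal_string.toList 0).filter
            (fun p => PySem.Chars.isIn [p.2] letters.toList)).map Prod.fst) 0).foldl
      (fun res (p : Int × Int) =>
        if p.1 % 2 == 0 then
          PySem.List.pySetD res p.2 (PySem.Chars.upperChar (PySem.List.pyGetD res p.2 ' '))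
        else res)
      normal_string.toList)

-- ===== PRECONDITION & SPEC =====
def Spec_convert_into_upper (normal_string : String) (letters : String) (out : String) : Prop := out = convert_into_upper_alt normal_string letters
instance (normal_string : String) (letters : String) (out : String) : Decidable (Spec_convert_into_upper normal_string letters out) := by unfold Spec_convert_into_upper; infer_instance

-- ===== CLAIM (what is proved, stated in full; the proofs are below) =====
def Claim_equal_convert_into_upper : Prop := ∀ (normal_string : String) (letters : String), Dom_convert_into_upper normal_string letters → Spec_convert_into_upper normal_string letters (convert_into_upper normal_string letters)

-- ===== LEMMAS AND PROOFS =====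

-- common specification: uppercase the matching chars at even running match-count (parity seeded by k)
def pvSpecF (ls : List Char) : List Char → Int → List Char
  | [], _ => []
  | c :: t, k =>
    if PySem.Chars.isIn [c] ls then
      (if k % 2 == 0 then PySem.Chars.upperChar c else c) :: pvSpecF ls t (k + 1)
    else c :: pvSpecF ls t k

lemma pvA_loop (ls : List Char) (cs : List Char) : ∀ (acc : List Char) (k : Int),
    (cs.foldl
      (fun (st : List Char × Int) c =>
        if PySem.Chars.isIn [c] ls && (st.2 % 2 == 0) then
          (st.1 ++ [PySem.Chars.upperChar c], st.2 + 1)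
        else if PySem.Chars.isIn [c] ls && !(st.2 % 2 == 0) then
          (st.1 ++ [c], st.2 + 1)
        else
          (st.1 ++ [c], st.2))
      (acc, k)).1 = acc ++ pvSpecF ls cs k := by
  induction cs with
  | nil => intro acc k; simp [pvSpecF]
  | cons c t ih =>
    intro acc k
    simp only [List.foldl_cons]
    cases hm : PySem.Chars.isIn [c] ls
    · simp only [Bool.false_and, Bool.false_eq_true, if_false]
      rw [ih]
      simp [pvSpecF, hm]
    · by_cases hd : (2 : Int) ∣ k
      · have hb : (k % 2 == 0) = true := by rw [beq_iff_eq]; omega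
        simp only [hb, Bool.and_true, reduceIte]
        rw [ih]
        simp [pvSpecF, hm, hd]
      · have hb : (k % 2 == 0) = false := by rw [beq_eq_false_iff_ne]; omega
        simp only [hb, Bool.and_false, Bool.not_false, Bool.and_true, Bool.false_eq_true,
          if_false, reduceIte]
        rw [ih]
        simp [pvSpecF, hm, hd]

-- the B-side index table, recursively
def pvIdx (ls : List Char) : List Char → Int → List Int
  | [], _ => []
  | c :: t, s =>
    if PySem.Chars.isIn [c] ls then s :: pvIdx ls t (s + 1) else pvIdx ls t (s + 1)

lemma pvIdx_eq (ls : List Char) (cs : List Char) : ∀ (s : Int),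
    ((PySem.List.enumerate cs s).filter (fun p => PySem.Chars.isIn [p.2] ls)).map Prod.fst
      = pvIdx ls cs s := by
  induction cs with
  | nil => intro s; simp [PySem.List.enumerate_nil, pvIdx]
  | cons c t ih =>
    intro s
    by_cases hm : PySem.Chars.isIn [c] ls <;>
      simp [PySem.List.enumerate_cons, hm, pvIdx, ih]

lemma pvIdx_shift (ls : List Char) (cs : List Char) : ∀ (s : Int),
    pvIdx ls cs (s + 1) = (pvIdx ls cs s).map (· + 1) := by
  induction cs with
  | nil => intro s; simp [pvIdx]
  | cons c t ih =>
    intro s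
    by_cases hm : PySem.Chars.isIn [c] ls <;> simp [pvIdx, hm, ih]

lemma pvIdx_nonneg (ls : List Char) (cs : List Char) : ∀ (s i : Int), i ∈ pvIdx ls cs s → s ≤ i := by
  induction cs with
  | nil => intro s i h; simp [pvIdx] at h
  | cons c t ih =>
    intro s i h
    by_cases hm : PySem.Chars.isIn [c] ls <;> simp [pvIdx, hm] at h
    · rcases h with h | h
      · omega
      · have := ih (s + 1) i h; omega
    · have := ih (s + 1) i h; omega

-- peel the head char off B's second pass when every index is shifted by one
lemma pvB_peel (ms : List Int) (h : ∀ i ∈ ms, 0 ≤ i) : ∀ (k : Int) (c : Char) (res : List Char),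
    (PySem.List.enumerate (ms.map (· + 1)) k).foldl
      (fun res (p : Int × Int) =>
        if p.1 % 2 == 0 then
          PySem.List.pySetD res p.2 (PySem.Chars.upperChar (PySem.List.pyGetD res p.2 ' '))
        else res)
      (c :: res)
    = c :: (PySem.List.enumerate ms k).foldl
      (fun res (p : Int × Int) =>
        if p.1 % 2 == 0 then
          PySem.List.pySetD res p.2 (PySem.Chars.upperChar (PySem.List.pyGetD res p.2 ' '))
        else res)
      res := by
  induction ms with
  | nil => intro k c res; simp [PySem.List.enumerate_nil]
  | cons i t ih =>
    intro k c res
    have hi : 0 ≤ i := h i (by simp)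
    have ht : ∀ j ∈ t, 0 ≤ j := fun j hj => h j (by simp [hj])
    obtain ⟨n, rfl⟩ : ∃ n : Nat, i = (n : Int) := ⟨i.toNat, by omega⟩
    have e1 : (n : Int) + 1 = ((n + 1 : Nat) : Int) := by push_cast; ring
    have hget : PySem.List.pyGetD (c :: res) ((n : Int) + 1) ' '
        = PySem.List.pyGetD res (n : Int) ' ' := by
      rw [e1, PySem.List.pyGetD_natCast, PySem.List.pyGetD_natCast]
      simp
    have hset : ∀ v : Char, PySem.List.pySetD (c :: res) ((n : Int) + 1) v
        = c :: PySem.List.pySetD res (n : Int) v := by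
      intro v
      rw [e1, PySem.List.pySetD_natCast, PySem.List.pySetD_natCast]
      simp
    simp only [List.map_cons, PySem.List.enumerate_cons, List.foldl_cons]
    cases hp : (k % 2 == 0)
    · rw [if_neg (by simp), if_neg (by simp)]
      exact ih ht (k + 1) c res
    · rw [if_pos rfl, if_pos rfl, hget, hset]
      exact ih ht (k + 1) c _

lemma pvB_loop (ls : List Char) (cs : List Char) : ∀ (k : Int),
    (PySem.List.enumerate (pvIdx ls cs 0) k).foldl
      (fun res (p : Int × Int) =>
        if p.1 % 2 == 0 then
          PySem.List.pySetD res p.2 (PySem.Chars.upperChar (PySem.List.pyGetD res p.2 ' '))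
        else res)
      cs
    = pvSpecF ls cs k := by
  induction cs with
  | nil => intro k; simp [pvIdx, PySem.List.enumerate_nil, pvSpecF]
  | cons c t ih =>
    intro k
    have hnn : ∀ i ∈ pvIdx ls t 0, 0 ≤ i := fun i hi => pvIdx_nonneg ls t 0 i hi
    by_cases hm : PySem.Chars.isIn [c] ls
    · have hidx : pvIdx ls (c :: t) 0 = 0 :: (pvIdx ls t 0).map (· + 1) := by
        simp only [pvIdx, hm, reduceIte]
        exact congrArg (List.cons 0) (pvIdx_shift ls t 0)
      rw [hidx, PySem.List.enumerate_cons]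
      simp only [List.foldl_cons]
      by_cases hd : (2 : Int) ∣ k
      · have hb : (k % 2 == 0) = true := by rw [beq_iff_eq]; omega
        rw [if_pos hb, PySem.List.pyGetD_zero_cons,
          show PySem.List.pySetD (c :: t) (0 : Int) (PySem.Chars.upperChar c)
            = PySem.Chars.upperChar c :: t from by
              rw [PySem.List.pySetD_of_nonneg _ _ le_rfl]; rfl]
        rw [pvB_peel _ hnn, ih (k + 1)]
        simp [pvSpecF, hm, hd]
      · have hb : (k % 2 == 0) = false := by rw [beq_eq_false_iff_ne]; omega
        rw [if_neg (by simp [hb]), pvB_peel _ hnn, ih (k + 1)]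
        simp [pvSpecF, hm, hd]
    · have hidx : pvIdx ls (c :: t) 0 = (pvIdx ls t 0).map (· + 1) := by
        simp only [pvIdx, hm]
        exact pvIdx_shift ls t 0
      rw [hidx, pvB_peel _ hnn, ih k]
      simp [pvSpecF, hm]

-- ===== VERDICT (by name: the statement is the Claim_ definition above) =====
theorem convert_into_upper_spec : Claim_equal_convert_into_upper := by
  intro ns ls _
  unfold Spec_convert_into_upper convert_into_upper convert_into_upper_alt
  rw [pvIdx_eq ls.toList ns.toList 0, pvA_loop ls.toList ns.toList [] 0,
    pvB_loop ls.toList ns.toList 0, List.nil_append]
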